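-- pv_equiv track=rewrite | github.com/france122/DataStructure_Algorithem | 03排序与查找/月度开销.py | check
-- ===== SOURCE A (Python) =====
-- def check(f,l,m):
--     count=0
--     x=l.copy()
--     while x:
--         if len(x)==1:
--             x.pop()
--             count+=1
--         else:
--             if x[-1]+x[len(x)-2]<=f:
--                 add=x[-1] + x[len(x) - 2]
--                 x.pop()
--                 x.pop()
--                 x.append(add)
--             else:
--                 x.pop()
--                 count+=1
--     if count>m:
--         return False
--     else:
--         return True
-- ===== SOURCE B (Python) =====
-- def check(f, l, m):
--     groups = 0
--     run = None
--     for e in reversed(l):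
--         if run is not None and run + e <= f:
--             run += e
--         else:
--             groups += 1
--             run = e
--     return groups <= m
-- ===== Notes on version B (the rewrite author's own statement) =====
-- stated objective: simpler
-- what changed: Replaces A's destructive stack simulation (copying l, repeatedly popping the last two elements and re-appending their partial sum) with a single accumulator pass over reversed(l) that keeps only a running sum and a group count.
import Mathlib
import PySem

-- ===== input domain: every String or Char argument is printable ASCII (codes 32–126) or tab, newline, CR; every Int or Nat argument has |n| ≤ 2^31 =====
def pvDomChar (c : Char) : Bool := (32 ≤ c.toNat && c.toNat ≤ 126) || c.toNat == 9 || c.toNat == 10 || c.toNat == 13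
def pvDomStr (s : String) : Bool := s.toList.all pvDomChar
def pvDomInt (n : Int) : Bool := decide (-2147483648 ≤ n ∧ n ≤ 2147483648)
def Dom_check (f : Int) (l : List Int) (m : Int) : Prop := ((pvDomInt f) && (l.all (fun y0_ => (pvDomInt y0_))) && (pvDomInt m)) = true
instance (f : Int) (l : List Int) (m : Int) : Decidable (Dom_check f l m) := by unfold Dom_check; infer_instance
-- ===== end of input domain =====

-- B replaces A's stack simulation (pop/pop/append of partial sums on a copy of l) by one
-- accumulator pass over the reversed list; objective: simpler.

-- ===== PORT A =====
-- A's while loop over the mutable copy x: each iteration shortens x by one, so it is a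
-- recursion on x.length. x[-1] / x[len(x)-2] are read with getLast?.getD 0, exact here
-- because both reads happen only under the len(x) ≥ 2 branch.
def checkLoop (f : Int) (x : List Int) (count : Int) : Int :=
  if x.length = 0 then count
  else if x.length = 1 then checkLoop f x.dropLast (count + 1)
  else
    let a := (x.getLast?).getD 0
    let b := ((x.dropLast).getLast?).getD 0
    if a + b ≤ f then checkLoop f (x.dropLast.dropLast ++ [a + b]) count
    else checkLoop f x.dropLast (count + 1)
termination_by x.length
decreasing_by
  all_goals simp only [List.length_append, List.length_dropLast, List.length_cons,
    List.length_nil]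
  all_goals omega

def check (f : Int) (l : List Int) (m : Int) : Bool :=
  let count := checkLoop f l 0
  if count > m then false else true

-- ===== PORT B =====
-- B's for-loop over reversed(l) with state (run : Option Int, groups : Int).
def checkAltLoop (f : Int) : List Int → Option Int → Int → Int
  | [], _, groups => groups
  | e :: rest, run, groups =>
    match run with
    | some r =>
      if r + e ≤ f then checkAltLoop f rest (some (r + e)) groups
      else checkAltLoop f rest (some e) (groups + 1)
    | none => checkAltLoop f rest (some e) (groups + 1)

def check_alt (f : Int) (l : List Int) (m : Int) : Bool :=
  decide (checkAltLoop f l.reverse none 0 ≤ m)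

-- ===== PRECONDITION & SPEC =====
def Spec_check (f : Int) (l : List Int) (m : Int) (out : Bool) : Prop := out = check_alt f l m
instance (f : Int) (l : List Int) (m : Int) (out : Bool) : Decidable (Spec_check f l m out) := by unfold Spec_check; infer_instance

-- ===== CLAIM (what is proved, stated in full; the proofs are below) =====
def Claim_equal_check : Prop := ∀ (f : Int) (l : List Int) (m : Int), Dom_check f l m → Spec_check f l m (check f l m)

-- ===== LEMMAS AND PROOFS =====

lemma checkAltLoop_shift (f : Int) (l : List Int) (run : Option Int) (g : Int) :
    checkAltLoop f l run g = g + checkAltLoop f l run 0 := by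
  induction l generalizing run g with
  | nil => simp [checkAltLoop]
  | cons e rest ih =>
    cases run with
    | none =>
      simp only [checkAltLoop]
      rw [ih (some e) (g + 1), ih (some e) (0 + 1)]; ring
    | some r =>
      simp only [checkAltLoop]
      split_ifs
      · rw [ih (some (r + e)) g]
      · rw [ih (some e) (g + 1), ih (some e) (0 + 1)]; ring

lemma checkLoop_eq (f : Int) :
    ∀ (n : ℕ) (x : List Int), x.length = n → ∀ count : Int,
      checkLoop f x count = count + checkAltLoop f x.reverse none 0 := by
  intro n
  induction n using Nat.strong_induction_on with
  | _ n ih =>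
    intro x hx count
    rcases List.eq_nil_or_concat x with rfl | ⟨ys, r, rfl⟩
    · simp [checkLoop, checkAltLoop]
    · simp only [List.concat_eq_append] at hx ⊢
      rcases List.eq_nil_or_concat ys with rfl | ⟨zs, b, rfl⟩
      · -- x = [r]
        rw [checkLoop]
        norm_num
        show checkLoop f [] (count + 1) = _
        rw [checkLoop]
        simp [checkAltLoop]
      · -- x = (zs ++ [b]) ++ [r]
        simp only [List.concat_eq_append] at hx ⊢
        have hlen : ((zs ++ [b]) ++ [r]).length = n := hx
        simp only [List.length_append, List.length_cons, List.length_nil] at hlen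
        rw [checkLoop]
        have hne : ¬ ((zs ++ [b]) ++ [r]).length = 0 := by
          simp only [List.length_append, List.length_cons, List.length_nil]; omega
        have hlen1 : ¬ ((zs ++ [b]) ++ [r]).length = 1 := by
          simp only [List.length_append, List.length_cons, List.length_nil]; omega
        rw [if_neg hne, if_neg hlen1]
        simp only [List.getLast?_concat, List.dropLast_concat, Option.getD_some]
        have hrev : ((zs ++ [b]) ++ [r]).reverse = r :: b :: zs.reverse := by simp
        rw [hrev]
        by_cases hm : r + b ≤ f
        · rw [if_pos hm]
          have hlt : (zs ++ [r + b]).length < n := by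
            simp only [List.length_append, List.length_cons, List.length_nil]; omega
          rw [ih _ hlt _ rfl]
          simp only [checkAltLoop, if_pos hm, List.reverse_append, List.reverse_cons,
            List.reverse_nil, List.nil_append, List.cons_append]
        · rw [if_neg hm]
          have hlt : (zs ++ [b]).length < n := by
            simp only [List.length_append, List.length_cons, List.length_nil]; omega
          rw [ih _ hlt _ rfl]
          simp only [checkAltLoop, if_neg hm, List.reverse_append, List.reverse_cons,
            List.reverse_nil, List.nil_append, List.cons_append]
          rw [checkAltLoop_shift f zs.reverse (some b) (0 + 1),
            checkAltLoop_shift f zs.reverse (some b) (0 + 1 + 1)]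
          ring

-- ===== VERDICT (by name: the statement is the Claim_ definition above) =====
theorem check_spec : Claim_equal_check := by
  intro f l m _
  unfold Spec_check check check_alt
  rw [checkLoop_eq f l.length l rfl 0]
  simp only [zero_add]
  by_cases h : checkAltLoop f l.reverse none 0 > m
  · have h2 : ¬ checkAltLoop f l.reverse none 0 ≤ m := by omega
    simp [h, h2]
  · have h2 : checkAltLoop f l.reverse none 0 ≤ m := by omega
    simp [h, h2]
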